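-- pv_equiv track=rewrite | github.com/orgua/Unified-MCU-BIST-Framework-PythonMonitor | event_decoder.py | merge_handshake_events
-- ===== SOURCE A (Python) =====
-- def merge_handshake_events(events):
--     merged = []
--     has_initiator = "HANDSHAKE_OK_INITIATOR" in events
--     has_responder = "HANDSHAKE_OK_RESPONDER" in events
--
--     # Add HANDSHAKE_OK if both initiator and responder are present
--     if has_initiator and has_responder:
--         merged.append("HANDSHAKE_OK")
--
--     # Add all other events (excluding the individual handshake events)
--     for event in events:
--         if event not in ["HANDSHAKE_OK_INITIATOR", "HANDSHAKE_OK_RESPONDER"]: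
--             merged.append(event)
--         elif has_initiator and not has_responder and event == "HANDSHAKE_OK_INITIATOR":
--             # Keep initiator if responder is not present
--             merged.append(event)
--         elif has_responder and not has_initiator and event == "HANDSHAKE_OK_RESPONDER":
--             # Keep responder if initiator is not present
--             merged.append(event)
--
--     return merged
-- ===== SOURCE B (Python) =====
-- def merge_handshake_events(events):
--     # Single backwards pass: gather presence flags and the non-handshake events
--     # (in reverse) in one sweep, then decide once at the end.
--     saw_init = False
--     saw_resp = False
--     kept_rev = []
--     for e in reversed(events):
--         if e == "HANDSHAKE_OK_INITIATOR":
--             saw_init = True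
--         elif e == "HANDSHAKE_OK_RESPONDER":
--             saw_resp = True
--         else:
--             kept_rev.append(e)
--     if saw_init and saw_resp:
--         kept_rev.append("HANDSHAKE_OK")
--         kept_rev.reverse()
--         return kept_rev
--     return list(events)
-- ===== Notes on version B (the rewrite author's own statement) =====
-- stated objective: alternative
-- what changed: Replaces A's staged approach (two whole-list membership scans followed by a forward loop with three-way elif logic per element) with one backwards sweep that accumulates the presence flags and the filtered events in reverse in a single pass, then decides once at the end whether to emit the collapsed list (reversing the accumulator with HANDSHAKE_OK appended) or a fresh copy.
import Mathlib
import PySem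

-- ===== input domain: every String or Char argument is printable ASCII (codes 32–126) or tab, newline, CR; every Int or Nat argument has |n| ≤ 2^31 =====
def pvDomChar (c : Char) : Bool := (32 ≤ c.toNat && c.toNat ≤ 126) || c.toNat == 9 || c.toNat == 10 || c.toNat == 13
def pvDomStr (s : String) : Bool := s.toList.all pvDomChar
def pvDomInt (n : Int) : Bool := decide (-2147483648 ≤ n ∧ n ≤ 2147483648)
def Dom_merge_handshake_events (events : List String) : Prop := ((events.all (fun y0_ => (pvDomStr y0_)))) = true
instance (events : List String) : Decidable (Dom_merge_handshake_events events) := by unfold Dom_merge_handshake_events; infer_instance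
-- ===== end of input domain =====

-- ===== PORT A =====
def merge_handshake_events (events : List String) : List String :=
  let merged : List String := []
  let has_initiator := events.contains "HANDSHAKE_OK_INITIATOR"
  let has_responder := events.contains "HANDSHAKE_OK_RESPONDER"
  let merged := if has_initiator && has_responder then merged ++ ["HANDSHAKE_OK"] else merged
  events.foldl (fun merged event =>
    if !(event == "HANDSHAKE_OK_INITIATOR" || event == "HANDSHAKE_OK_RESPONDER") then
      merged ++ [event]
    else if has_initiator && !has_responder && event == "HANDSHAKE_OK_INITIATOR" then
      merged ++ [event]
    else if has_responder && !has_initiator && event == "HANDSHAKE_OK_RESPONDER" then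
      merged ++ [event]
    else merged) merged

-- ===== PORT B =====
-- B: one backwards sweep accumulating flags and the filtered events in reverse,
-- one final decision (objective: alternative decomposition, same cost).
def mheStepB (st : Bool × Bool × List String) (e : String) : Bool × Bool × List String :=
  if e == "HANDSHAKE_OK_INITIATOR" then (true, st.2.1, st.2.2)
  else if e == "HANDSHAKE_OK_RESPONDER" then (st.1, true, st.2.2)
  else (st.1, st.2.1, st.2.2 ++ [e])

def merge_handshake_events_alt (events : List String) : List String :=
  let st := events.reverse.foldl mheStepB
    ((false, false, ([] : List String)) : Bool × Bool × List String)
  if st.1 && st.2.1 then (st.2.2 ++ ["HANDSHAKE_OK"]).reverse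
  else events

-- ===== PRECONDITION & SPEC =====
def Spec_merge_handshake_events (events : List String) (out : List String) : Prop := out = merge_handshake_events_alt events
instance (events : List String) (out : List String) : Decidable (Spec_merge_handshake_events events out) := by unfold Spec_merge_handshake_events; infer_instance

-- ===== CLAIM (what is proved, stated in full; the proofs are below) =====
def Claim_equal_merge_handshake_events : Prop := ∀ (events : List String), Dom_merge_handshake_events events → Spec_merge_handshake_events events (merge_handshake_events events)

-- ===== LEMMAS AND PROOFS =====

theorem mhe_fold_filter (hi hr : Bool) (acc : List String) (l : List String) :
    l.foldl (fun merged event =>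
      if !(event == "HANDSHAKE_OK_INITIATOR" || event == "HANDSHAKE_OK_RESPONDER") then
        merged ++ [event]
      else if hi && !hr && event == "HANDSHAKE_OK_INITIATOR" then
        merged ++ [event]
      else if hr && !hi && event == "HANDSHAKE_OK_RESPONDER" then
        merged ++ [event]
      else merged) acc
    = acc ++ l.filter (fun event =>
        !(event == "HANDSHAKE_OK_INITIATOR" || event == "HANDSHAKE_OK_RESPONDER")
        || (hi && !hr && event == "HANDSHAKE_OK_INITIATOR")
        || (hr && !hi && event == "HANDSHAKE_OK_RESPONDER")) := by
  have hstep : (fun (merged : List String) (event : String) =>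
      if !(event == "HANDSHAKE_OK_INITIATOR" || event == "HANDSHAKE_OK_RESPONDER") then
        merged ++ [event]
      else if hi && !hr && event == "HANDSHAKE_OK_INITIATOR" then
        merged ++ [event]
      else if hr && !hi && event == "HANDSHAKE_OK_RESPONDER" then
        merged ++ [event]
      else merged)
    = (fun (merged : List String) (event : String) =>
      if (!(event == "HANDSHAKE_OK_INITIATOR" || event == "HANDSHAKE_OK_RESPONDER")
          || (hi && !hr && event == "HANDSHAKE_OK_INITIATOR")
          || (hr && !hi && event == "HANDSHAKE_OK_RESPONDER")) then merged ++ [event]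
      else merged) := by
    funext m e
    cases h1 : (!(e == "HANDSHAKE_OK_INITIATOR" || e == "HANDSHAKE_OK_RESPONDER")) <;>
      cases h2 : (hi && !hr && e == "HANDSHAKE_OK_INITIATOR") <;>
      cases h3 : (hr && !hi && e == "HANDSHAKE_OK_RESPONDER") <;>
      simp [h1, h2, h3]
  rw [hstep, PySem.List.foldl_append_if_eq_filter]

-- B's backwards fold computes the two flags and the filtered list (in traversal order).
theorem mhe_alt_fold (l : List String) (si sr : Bool) (acc : List String) :
    l.foldl mheStepB ((si, sr, acc) : Bool × Bool × List String)
    = (si || l.contains "HANDSHAKE_OK_INITIATOR",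
       sr || l.contains "HANDSHAKE_OK_RESPONDER",
       acc ++ l.filter (fun e => !(e == "HANDSHAKE_OK_INITIATOR" || e == "HANDSHAKE_OK_RESPONDER"))) := by
  induction l generalizing si sr acc with
  | nil => simp
  | cons a t ih =>
    by_cases h1 : a = "HANDSHAKE_OK_INITIATOR"
    · subst h1
      rw [List.foldl_cons, show mheStepB (si, sr, acc) "HANDSHAKE_OK_INITIATOR" = (true, sr, acc)
        from by simp [mheStepB], ih]
      simp
    · by_cases h2 : a = "HANDSHAKE_OK_RESPONDER"
      · subst h2
        rw [List.foldl_cons, show mheStepB (si, sr, acc) "HANDSHAKE_OK_RESPONDER" = (si, true, acc)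
          from by simp [mheStepB], ih]
        simp [h1]
      · rw [List.foldl_cons, show mheStepB (si, sr, acc) a = (si, sr, acc ++ [a])
          from by simp [mheStepB, h1, h2], ih]
        simp [h1, h2, Ne.symm h1, Ne.symm h2, List.filter_cons, Bool.or_left_comm]

-- ===== VERDICT (by name: the statement is the Claim_ definition above) =====
theorem merge_handshake_events_spec : Claim_equal_merge_handshake_events := by
  intro events _
  unfold Spec_merge_handshake_events merge_handshake_events merge_handshake_events_alt
  rw [mhe_fold_filter, mhe_alt_fold]
  simp only [Bool.false_or, List.nil_append, List.contains_reverse, List.filter_reverse,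
    List.reverse_append, List.reverse_reverse, List.reverse_cons, List.reverse_nil]
  by_cases hi : events.contains "HANDSHAKE_OK_INITIATOR" = true <;>
    by_cases hr : events.contains "HANDSHAKE_OK_RESPONDER" = true <;>
    simp only [hi, hr, Bool.true_and, Bool.false_and, Bool.and_true, Bool.and_false,
      Bool.not_true, Bool.not_false, Bool.or_false, Bool.false_or, Bool.or_self,
      if_true, if_false, Bool.false_eq_true, List.nil_append, List.singleton_append]
  all_goals {
    rw [List.filter_eq_self]
    intro a ha
    rcases eq_or_ne a "HANDSHAKE_OK_INITIATOR" with h | h <;>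
      rcases eq_or_ne a "HANDSHAKE_OK_RESPONDER" with h2 | h2 <;>
      subst_vars <;> simp_all [List.contains_iff_mem]
  }
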